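-- pv_equiv track=rewrite | github.com/pypi-data/pypi-mirror-66 | packages/labvision/labvision-0.1.8.tar.gz/labvision-0.1.8/labvision/io/visualize.py | __rmdupcurve__
-- ===== SOURCE A (Python) =====
-- def __rmdupcurve__(x, idx):
--     new_x = []
--     dup_start = x[idx][0]
--     for i, (epoch, data) in enumerate(x):
--         if epoch >= dup_start and i < idx:
--             continue
--         new_x.append((epoch, data))
--     return new_x
-- ===== SOURCE B (Python) =====
-- def __rmdupcurve__(x, idx):
--     dup_start = x[idx][0]
--     new_x = list(x)
--     for i in range(idx - 1, -1, -1):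
--         if new_x[i][0] >= dup_start:
--             del new_x[i]
--     return new_x
-- ===== Notes on version B (the rewrite author's own statement) =====
-- stated objective: alternative
-- what changed: Instead of A's forward enumerate pass that rebuilds the list by appending every kept point, B copies x and walks the prefix indices idx-1..0 BACKWARDS, deleting in place (del new_x[i]) each point whose epoch reaches x[idx][0]; the suffix is never touched and no index-vs-idx test per element remains.
import Mathlib
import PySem

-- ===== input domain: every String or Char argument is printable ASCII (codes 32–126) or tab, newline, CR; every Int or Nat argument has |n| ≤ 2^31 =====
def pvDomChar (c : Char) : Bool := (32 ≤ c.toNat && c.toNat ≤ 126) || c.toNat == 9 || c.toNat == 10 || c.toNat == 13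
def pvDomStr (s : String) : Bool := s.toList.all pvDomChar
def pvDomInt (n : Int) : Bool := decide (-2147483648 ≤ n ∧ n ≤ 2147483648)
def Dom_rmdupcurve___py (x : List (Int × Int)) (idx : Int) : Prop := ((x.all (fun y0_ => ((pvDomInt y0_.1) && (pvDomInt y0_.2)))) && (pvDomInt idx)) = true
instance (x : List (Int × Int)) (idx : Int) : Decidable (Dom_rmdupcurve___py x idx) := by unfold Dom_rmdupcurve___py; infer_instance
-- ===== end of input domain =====

-- B copies x and deletes offending prefix points in place while walking indices
-- idx-1..0 backwards, instead of A's forward enumerate pass rebuilding the list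
-- (objective: alternative; same return value on every valid index).

-- ===== PORT A =====
-- literal transliteration of A: x[idx][0], then one enumerate loop appending kept points
def rmdupcurve___py (x : List (Int × Int)) (idx : Int) : List (Int × Int) :=
  match PySem.List.pyGet? x idx with
  | none => []  -- IndexError in Python; excluded by Pre_
  | some p =>
    (PySem.List.enumerate x 0).foldl
      (fun acc q => if q.2.1 ≥ p.1 ∧ q.1 < idx then acc else acc ++ [q.2]) []

-- ===== PORT B =====
-- literal transliteration of Source B: dup_start = x[idx][0]; new_x = list(x);
-- for i in range(idx-1, -1, -1): if new_x[i][0] >= dup_start: del new_x[i]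
def rmdupcurve___py_alt (x : List (Int × Int)) (idx : Int) : List (Int × Int) :=
  match PySem.List.pyGet? x idx with
  | none => []  -- IndexError in Python; excluded by Pre_
  | some p =>
    (PySem.List.pyRange (idx - 1) (-1) (-1)).foldl
      (fun out i =>
        match PySem.List.pyGet? out i with
        | none => out  -- unreachable: i is a valid index of out
        | some q => if q.1 ≥ p.1 then out.eraseIdx i.toNat else out) x

-- ===== PRECONDITION & SPEC =====
-- Pre_ excludes exactly the inputs where x[idx] raises IndexError (idx out of range).
def Pre_rmdupcurve___py (x : List (Int × Int)) (idx : Int) : Prop :=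
  -(x.length : Int) ≤ idx ∧ idx < (x.length : Int)
instance (x : List (Int × Int)) (idx : Int) : Decidable (Pre_rmdupcurve___py x idx) := by
  unfold Pre_rmdupcurve___py; infer_instance

def pvWitness_rmdupcurve___py : (List (Int × Int)) × Int := ([(1, 2), (1, 3)], 1)

def Spec_rmdupcurve___py (x : List (Int × Int)) (idx : Int) (out : List (Int × Int)) : Prop := out = rmdupcurve___py_alt x idx
instance (x : List (Int × Int)) (idx : Int) (out : List (Int × Int)) : Decidable (Spec_rmdupcurve___py x idx out) := by unfold Spec_rmdupcurve___py; infer_instance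

-- ===== CLAIM (what is proved, stated in full; the proofs are below) =====
def Claim_equal_rmdupcurve___py : Prop := ∀ (x : List (Int × Int)) (idx : Int), Dom_rmdupcurve___py x idx → Pre_rmdupcurve___py x idx → Spec_rmdupcurve___py x idx (rmdupcurve___py x idx)

-- ===== LEMMAS AND PROOFS =====

-- A's loop invariant: the fold over enumerate x k equals acc ++ filtered-take ++ drop,
-- with the split at (idx - k).toNat.
lemma rmdup_key (ds idx : Int) :
    ∀ (x : List (Int × Int)) (k : Int) (acc : List (Int × Int)),
      (PySem.List.enumerate x k).foldl
        (fun acc q => if q.2.1 ≥ ds ∧ q.1 < idx then acc else acc ++ [q.2]) acc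
      = acc ++ ((x.take (idx - k).toNat).filter (fun q => q.1 < ds))
            ++ x.drop (idx - k).toNat := by
  intro x
  induction x with
  | nil => intro k acc; simp [PySem.List.enumerate]
  | cons hd tl ih =>
    intro k acc
    rw [PySem.List.enumerate_cons, List.foldl_cons]
    by_cases hk : k < idx
    · have hn : (idx - k).toNat = (idx - (k + 1)).toNat + 1 := by omega
      rw [hn]
      simp only [List.take_succ_cons, List.drop_succ_cons]
      by_cases he : hd.1 ≥ ds
      · have hcond : (hd.1 ≥ ds ∧ k < idx) = True := by simp [he, hk]
        simp only [hcond, if_true, ih]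
        have : ¬ hd.1 < ds := by omega
        simp [this]
      · have hcond : (hd.1 ≥ ds ∧ k < idx) = False := by simp [he]
        simp only [hcond, if_false, ih]
        have : hd.1 < ds := by omega
        simp [this]
    · have hn : (idx - k).toNat = 0 := by omega
      have hn' : (idx - (k + 1)).toNat = 0 := by omega
      have hcond : (hd.1 ≥ ds ∧ k < idx) = False := by simp [hk]
      simp only [hcond, if_false, ih, hn, hn']
      simp

-- deleting at position a.length of a ++ [v] ++ s removes v
lemma rmdup_eraseIdx_append {A : Type} (a : List A) (v : A) (s : List A) :
    (a ++ ([v] ++ s)).eraseIdx a.length = a ++ s := by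
  induction a with
  | nil => rfl
  | cons h t ih => simpa [List.eraseIdx] using ih

-- B's loop invariant: deleting backwards over indices k-1..0 of (x.take k ++ s)
-- leaves the filtered prefix in front of the untouched s.
lemma rmdup_del_key (ds : Int) (x : List (Int × Int)) :
    ∀ (k : Nat), k ≤ x.length → ∀ (s : List (Int × Int)),
      (PySem.List.pyRange ((k : Int) - 1) (-1) (-1)).foldl
        (fun out i =>
          match PySem.List.pyGet? out i with
          | none => out
          | some q => if q.1 ≥ ds then out.eraseIdx i.toNat else out)
        (x.take k ++ s)
      = ((x.take k).filter (fun q => q.1 < ds)) ++ s := by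
  intro k
  induction k with
  | zero =>
    intro _ s
    rw [PySem.List.pyRange_neg_one_eq_nil (by omega)]
    simp
  | succ k ih =>
    intro hk s
    have hklt : k < x.length := by omega
    have htk : x.take (k + 1) = x.take k ++ [x[k]] := by
      rw [List.take_add_one, List.getElem?_eq_getElem hklt]; rfl
    have hlen : (x.take k).length = k := List.length_take_of_le (by omega)
    have ih' := ih (by omega)
    rw [show ((k + 1 : Nat) : Int) - 1 = (k : Int) by push_cast; ring,
        PySem.List.pyRange_neg_one_cons (by omega : (-1 : Int) < (k : Int)),
        List.foldl_cons, htk, List.append_assoc]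
    generalize hv : x[k] = v at *
    generalize ha : x.take k = a at *
    have hget : PySem.List.pyGet? (a ++ ([v] ++ s)) ((k : Nat) : Int) = some v := by
      rw [← hlen]; simpa using PySem.List.pyGet?_append_length (pre := a) (y := v) (ys := s)
    rw [hget]
    simp only
    by_cases he : v.1 ≥ ds
    · rw [if_pos he, Int.toNat_natCast]
      have herase : (a ++ ([v] ++ s)).eraseIdx k = a ++ s := by
        rw [← hlen]; exact rmdup_eraseIdx_append a v s
      rw [herase, ih' s]
      have hnot : ¬ v.1 < ds := by omega
      simp [List.filter_append, hnot]
    · rw [if_neg he, show a ++ ([v] ++ s) = a ++ (v :: s) from rfl, ih' (v :: s)]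
      have hyes : v.1 < ds := by omega
      simp [List.filter_append, hyes]

-- ===== VERDICT (by name: the statement is the Claim_ definition above) =====
theorem rmdupcurve___py_spec : Claim_equal_rmdupcurve___py := by
  intro x idx _ hpre
  obtain ⟨h1, h2⟩ := hpre
  unfold Spec_rmdupcurve___py rmdupcurve___py rmdupcurve___py_alt
  cases h : PySem.List.pyGet? x idx with
  | none => rfl
  | some p =>
    simp only
    rw [rmdup_key p.1 idx x 0 []]
    by_cases hidx : 0 ≤ idx
    · have hk : idx.toNat ≤ x.length := by omega
      have hc : ((idx.toNat : Int)) - 1 = idx - 1 := by omega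
      have := rmdup_del_key p.1 x idx.toNat hk (x.drop idx.toNat)
      rw [List.take_append_drop] at this
      rw [hc] at this
      rw [this]
      simp
    · have hr : PySem.List.pyRange (idx - 1) (-1) (-1) = [] :=
        PySem.List.pyRange_neg_one_eq_nil (by omega)
      rw [hr]
      have hz : idx.toNat = 0 := by omega
      simp [hz]
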